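-- pv_equiv track=rewrite | github.com/kh277/BOJ | 백준/Gold/1917. 정육면체 전개도/정육면체 전개도.py | deleteBlank
-- ===== SOURCE A (Python) =====
-- def checkAllZero(A):
--     for i in A:
--         if i != 0:
--             return False
--
--     return True
--
-- def deleteBlank(grid):
--     canLeftX = [0, len(grid[0])]
--     canLeftY = [0, len(grid)]
--
--     # 위쪽 가로줄 제거
--     for y in range(len(grid)):
--         if checkAllZero(grid[y]) == True:
--             canLeftY[0] += 1
--         else:
--             break
--
--     # 아래쪽 가로줄 제거
--     for y in range(len(grid)-1, -1, -1):
--         if checkAllZero(grid[y]) == True: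
--             canLeftY[1] -= 1
--         else:
--             break
--
--     # 앞쪽 가로줄 제거
--     for x in range(len(grid[0])):
--         if checkAllZero([i[x] for i in grid]) == True:
--             canLeftX[0] += 1
--         else:
--             break
--
--     # 뒤쪽 가로줄 제거
--     for x in range(len(grid[0])-1, -1, -1):
--         if checkAllZero([i[x] for i in grid]) == True:
--             canLeftX[1] -= 1
--         else:
--             break
--
--     return [i[canLeftX[0]:canLeftX[1]] for i in grid[canLeftY[0]:canLeftY[1]]]
-- ===== SOURCE B (Python) =====
-- def deleteBlank(grid):
--     ys = [y for y, row in enumerate(grid) if any(row)]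
--     if not ys:
--         return []
--     xs = [x for x in range(len(grid[0])) if any([row[x] for row in grid])]
--     return [row[xs[0]:xs[-1] + 1] for row in grid[ys[0]:ys[-1] + 1]]
-- ===== Notes on version B (the rewrite author's own statement) =====
-- stated objective: simpler
-- what changed: Replaces A's four directional early-break scans (top/bottom row loops, left/right column loops) with two index comprehensions listing the nonzero rows and columns, followed by a single bounding-box slice.
-- outside the precondition, e.g. on deleteBlank([[0, 0], [0, 0, 5]]): A returns [[]], B raises IndexError
import Mathlib
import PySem

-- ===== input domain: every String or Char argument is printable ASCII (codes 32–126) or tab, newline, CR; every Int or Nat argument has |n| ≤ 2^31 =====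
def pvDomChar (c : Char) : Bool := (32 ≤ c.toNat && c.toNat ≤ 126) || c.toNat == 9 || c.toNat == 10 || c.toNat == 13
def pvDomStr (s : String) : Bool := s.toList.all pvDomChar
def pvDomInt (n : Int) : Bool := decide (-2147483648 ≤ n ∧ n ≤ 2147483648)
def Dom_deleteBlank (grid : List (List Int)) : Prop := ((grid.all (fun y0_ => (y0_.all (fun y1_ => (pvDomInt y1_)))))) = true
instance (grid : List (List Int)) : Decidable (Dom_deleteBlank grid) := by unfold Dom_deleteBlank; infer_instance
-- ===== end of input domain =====

-- B replaces A's four directional early-break scans with index comprehensions of the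
-- nonzero rows/columns and one bounding-box slice (objective: simpler; same cost).

-- ===== PORT A =====
-- checkAllZero(A)
def checkAllZero (A : List Int) : Bool :=
  match A with
  | [] => true
  | i :: t => if i ≠ 0 then false else checkAllZero t

-- [i[x] for i in grid] — PySem.List.pyGetD is exact on the in-range column indices reached inside Pre_
def column (grid : List (List Int)) (x : Int) : List Int :=
  grid.map (fun i => PySem.List.pyGetD i x 0)

-- 'for y in <ys>: if checkAllZero(grid[y]) == True: count += 1 else: break'
def rowScan (grid : List (List Int)) (ys : List Int) : Nat :=
  match ys with
  | [] => 0
  | y :: t => if checkAllZero (PySem.List.pyGetD grid y []) then rowScan grid t + 1 else 0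

-- 'for x in <xs>: if checkAllZero([i[x] for i in grid]) == True: count += 1 else: break'
def colScan (grid : List (List Int)) (xs : List Int) : Nat :=
  match xs with
  | [] => 0
  | x :: t => if checkAllZero (column grid x) then colScan grid t + 1 else 0

def deleteBlank (grid : List (List Int)) : List (List Int) :=
  let W : Int := ((grid.headD []).length : Int)
  let H : Int := (grid.length : Int)
  let y0 : Int := (rowScan grid (PySem.List.pyRange 0 H 1) : Int)
  let y1 : Int := H - (rowScan grid (PySem.List.pyRange (H - 1) (-1) (-1)) : Int)
  let x0 : Int := (colScan grid (PySem.List.pyRange 0 W 1) : Int)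
  let x1 : Int := W - (colScan grid (PySem.List.pyRange (W - 1) (-1) (-1)) : Int)
  (PySem.List.slice grid (some y0) (some y1)).map fun i => PySem.List.slice i (some x0) (some x1)

-- ===== PORT B =====
-- any(row) on a list of ints (int truthiness)
def anyNonzero (row : List Int) : Bool := row.any fun v => v != 0

def deleteBlank_alt (grid : List (List Int)) : List (List Int) :=
  let ys : List Int := ((PySem.List.enumerate grid 0).filter fun p => anyNonzero p.2).map fun p => p.1
  if ys = [] then []
  else
    let xs : List Int :=
      (PySem.List.pyRange 0 ((grid.headD []).length : Int) 1).filter fun x => anyNonzero (column grid x)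
    (PySem.List.slice grid (some (ys.headD 0)) (some (ys.getLastD 0 + 1))).map fun row =>
      PySem.List.slice row (some (xs.headD 0)) (some (xs.getLastD 0 + 1))

-- ===== PRECONDITION & SPEC =====
-- Pre_ excludes the empty grid (A raises IndexError at grid[0]), grids with a row shorter than
-- the first row (A's column pass raises IndexError), and ragged grids whose nonzero cells all lie
-- beyond the first row's width, where A's fixed-width scans return an accidental list of empty
-- rows while B raises IndexError.
def Pre_deleteBlank (grid : List (List Int)) : Prop :=
  grid ≠ [] ∧ (∀ r ∈ grid, (grid.headD []).length ≤ r.length) ∧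
    ((∃ r ∈ grid, ∃ v ∈ r, v ≠ 0) → ∃ r ∈ grid, ∃ j < (grid.headD []).length, r.getD j 0 ≠ 0)
instance (grid : List (List Int)) : Decidable (Pre_deleteBlank grid) := by
  unfold Pre_deleteBlank; infer_instance

def pvWitness_deleteBlank : List (List Int) := [[0, 1], [0, 0]]

def Spec_deleteBlank (grid : List (List Int)) (out : List (List Int)) : Prop := out = deleteBlank_alt grid
instance (grid : List (List Int)) (out : List (List Int)) : Decidable (Spec_deleteBlank grid out) := by
  unfold Spec_deleteBlank; infer_instance

-- ===== CLAIM (what is proved, stated in full; the proofs are below) =====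
def Claim_equal_deleteBlank : Prop := ∀ (grid : List (List Int)), Dom_deleteBlank grid → Pre_deleteBlank grid → Spec_deleteBlank grid (deleteBlank grid)

-- ===== LEMMAS AND PROOFS =====

theorem checkAllZero_eq (r : List Int) : checkAllZero r = !anyNonzero r := by
  induction r with
  | nil => rfl
  | cons v t ih => by_cases h : v = 0 <;> simp [checkAllZero, anyNonzero, h, ih, bne]

theorem takeWhile_all {α : Type} (p : α → Bool) {l : List α} (h : ∀ a ∈ l, p a = true) :
    l.takeWhile p = l := by
  induction l with
  | nil => rfl
  | cons b t ih =>
    rw [List.takeWhile_cons, if_pos (h b (by simp))]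
    rw [ih fun x hx => h x (by simp [hx])]

theorem length_takeWhile_lt {α : Type} (p : α → Bool) {l : List α} {a : α}
    (ha : a ∈ l) (hpa : p a = false) : (l.takeWhile p).length < l.length := by
  induction l with
  | nil => cases ha
  | cons b t ih =>
    rcases List.mem_cons.mp ha with rfl | ha'
    · rw [List.takeWhile_cons, if_neg (by simp [hpa])]
      simp only [List.length_nil, List.length_cons]; omega
    · by_cases h : p b = true
      · rw [List.takeWhile_cons, if_pos h]
        have := ih ha'
        simp only [List.length_cons]; omega
      · rw [List.takeWhile_cons, if_neg h]
        simp only [List.length_nil, List.length_cons]; omega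

theorem head?_dropWhile_eq {α : Type} (p : α → Bool) (l : List α) :
    (l.dropWhile p).head? = l[(l.takeWhile p).length]? := by
  induction l with
  | nil => rfl
  | cons b t ih =>
    by_cases h : p b = true
    · rw [List.dropWhile_cons, if_pos h, List.takeWhile_cons, if_pos h]
      simp only [List.length_cons, List.getElem?_cons_succ]
      exact ih
    · rw [List.dropWhile_cons, if_neg h, List.takeWhile_cons, if_neg h]
      simp

theorem head?_filter_eq {α : Type} (p : α → Bool) (l : List α) :
    (l.filter p).head? = (l.dropWhile fun a => !p a).head? := by
  induction l with
  | nil => rfl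
  | cons b t ih =>
    by_cases h : p b = true
    · rw [List.filter_cons, if_pos h, List.dropWhile_cons, if_neg (by simp [h])]
      simp
    · rw [List.filter_cons, if_neg h, List.dropWhile_cons, if_pos (by simp [Bool.not_eq_true] at h ⊢; exact h)]
      exact ih

theorem head?_filter_getElem {α : Type} (l : List α) (p np : α → Bool) (hnp : ∀ a, np a = !p a) :
    (l.filter p).head? = l[(l.takeWhile np).length]? := by
  have h1 : np = fun a => !p a := funext hnp
  subst h1
  rw [head?_filter_eq, head?_dropWhile_eq]

theorem take_snd_len (l : List (Int × List Int)) :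
    (l.takeWhile fun p => !anyNonzero p.2).length
      = ((l.map fun p => p.2).takeWhile fun r => !anyNonzero r).length := by
  induction l with
  | nil => rfl
  | cons a t ih => by_cases h : anyNonzero a.2 = true <;> simp [h, ih]

theorem pyRange_countdown (n : Int) :
    PySem.List.pyRange (n - 1) (-1) (-1) = (PySem.List.pyRange 0 n 1).reverse := by
  rw [PySem.List.pyRange_neg_one_eq_reverse, show (-1 : Int) + 1 = 0 from by norm_num,
    show n - 1 + 1 = n from by ring]

theorem rowScan_eq (grid : List (List Int)) (ys : List Int) :
    rowScan grid ys = (ys.takeWhile fun y => !anyNonzero (PySem.List.pyGetD grid y [])).length := by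
  induction ys with
  | nil => rfl
  | cons y t ih =>
    by_cases h : anyNonzero (PySem.List.pyGetD grid y []) = true <;>
      simp [rowScan, checkAllZero_eq, h, ih]

theorem colScan_eq (grid : List (List Int)) (xs : List Int) :
    colScan grid xs = (xs.takeWhile fun x => !anyNonzero (column grid x)).length := by
  induction xs with
  | nil => rfl
  | cons x t ih =>
    by_cases h : anyNonzero (column grid x) = true <;>
      simp [colScan, checkAllZero_eq, h, ih]

theorem rowScan_top (grid : List (List Int)) :
    rowScan grid (PySem.List.pyRange 0 (grid.length : Int) 1)
      = (grid.takeWhile fun r => !anyNonzero r).length := by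
  conv_rhs => rw [← PySem.List.map_pyGetD_pyRange_zero' grid []]
  rw [List.takeWhile_map, rowScan_eq]
  simp only [Function.comp_def, List.length_map]

theorem rowScan_bot (grid : List (List Int)) :
    rowScan grid (PySem.List.pyRange ((grid.length : Int) - 1) (-1) (-1))
      = (grid.reverse.takeWhile fun r => !anyNonzero r).length := by
  rw [pyRange_countdown]
  conv_rhs => rw [← PySem.List.map_pyGetD_pyRange_zero' grid []]
  rw [← List.map_reverse, List.takeWhile_map, rowScan_eq]
  simp only [Function.comp_def, List.length_map]

theorem colScan_bot (grid : List (List Int)) (W : Int) :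
    colScan grid (PySem.List.pyRange (W - 1) (-1) (-1))
      = ((PySem.List.pyRange 0 W 1).reverse.takeWhile fun x => !anyNonzero (column grid x)).length := by
  rw [pyRange_countdown, colScan_eq]

theorem B_rows_ne (grid : List (List Int)) (r₀ : List Int) (hm : r₀ ∈ grid) (h : anyNonzero r₀ = true) :
    (((PySem.List.enumerate grid 0).filter fun p => anyNonzero p.2).map fun p => p.1) ≠ [] := by
  obtain ⟨i, hi, hieq⟩ := List.getElem_of_mem hm
  have hmem : ((0 : Int) + i, r₀) ∈ (PySem.List.enumerate grid 0).filter fun p => anyNonzero p.2 :=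
    List.mem_filter.mpr ⟨(PySem.List.mem_enumerate_iff _ _ _).mpr ⟨i, hi, by rw [hieq]⟩, by simpa using h⟩
  exact fun hnil => (List.ne_nil_of_mem hmem) (List.map_eq_nil_iff.mp hnil)

theorem B_rows_head (grid : List (List Int)) (r₀ : List Int) (hm : r₀ ∈ grid) (h : anyNonzero r₀ = true) :
    ((((PySem.List.enumerate grid 0).filter fun p => anyNonzero p.2).map fun p => p.1).headD 0)
      = ((grid.takeWhile fun r => !anyNonzero r).length : Int) := by
  have hk : ((PySem.List.enumerate grid 0).takeWhile fun p => !anyNonzero p.2).length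
      = (grid.takeWhile fun r => !anyNonzero r).length := by
    rw [take_snd_len, PySem.List.map_snd_enumerate]
  have hkn : (grid.takeWhile fun r => !anyNonzero r).length < grid.length :=
    length_takeWhile_lt _ hm (by simp [h])
  rw [List.headD_eq_head?, List.head?_map,
    head?_filter_getElem _ (fun q : Int × List Int => anyNonzero q.2) (fun q : Int × List Int => !anyNonzero q.2) (fun a => rfl), hk,
    PySem.List.getElem?_enumerate, List.getElem?_eq_getElem hkn]
  simp

theorem B_rows_last (grid : List (List Int)) (r₀ : List Int) (hm : r₀ ∈ grid) (h : anyNonzero r₀ = true) :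
    ((((PySem.List.enumerate grid 0).filter fun p => anyNonzero p.2).map fun p => p.1).getLastD 0) + 1
      = (grid.length : Int) - ((grid.reverse.takeWhile fun r => !anyNonzero r).length : Int) := by
  have hk : ((PySem.List.enumerate grid 0).reverse.takeWhile fun p => !anyNonzero p.2).length
      = (grid.reverse.takeWhile fun r => !anyNonzero r).length := by
    rw [take_snd_len, List.map_reverse, PySem.List.map_snd_enumerate]
  have htn : (grid.reverse.takeWhile fun r => !anyNonzero r).length < grid.length := by
    have := length_takeWhile_lt (fun r => !anyNonzero r) (List.mem_reverse.mpr hm) (by simp [h])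
    simpa using this
  have hmaplast : ((PySem.List.enumerate grid 0).filter fun p => anyNonzero p.2).getLast?.map (fun p => p.1)
      = (((PySem.List.enumerate grid 0).filter fun p => anyNonzero p.2).map fun p => p.1).getLast? := by
    rw [List.getLast?_eq_head?_reverse, List.getLast?_eq_head?_reverse, ← List.map_reverse, List.head?_map]
  rw [List.getLastD_eq_getLast?, ← hmaplast, List.getLast?_eq_head?_reverse, ← List.filter_reverse,
    head?_filter_getElem _ (fun q : Int × List Int => anyNonzero q.2) (fun q : Int × List Int => !anyNonzero q.2) (fun a => rfl), hk,
    List.getElem?_reverse (by rw [PySem.List.length_enumerate]; exact htn),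
    PySem.List.length_enumerate, PySem.List.getElem?_enumerate,
    List.getElem?_eq_getElem (by omega :
      grid.length - 1 - (grid.reverse.takeWhile fun r => !anyNonzero r).length < grid.length)]
  simp only [Option.map_some, Option.getD_some]
  omega

theorem X_head (grid : List (List Int)) (W x₀ : Int)
    (hx : x₀ ∈ PySem.List.pyRange 0 W 1) (hc : anyNonzero (column grid x₀) = true) :
    (((PySem.List.pyRange 0 W 1).filter fun x => anyNonzero (column grid x)).headD 0)
      = (((PySem.List.pyRange 0 W 1).takeWhile fun x => !anyNonzero (column grid x)).length : Int) := by
  have hlt : ((PySem.List.pyRange 0 W 1).takeWhile fun x => !anyNonzero (column grid x)).length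
      < (PySem.List.pyRange 0 W 1).length :=
    length_takeWhile_lt _ hx (by simp [hc])
  rw [List.headD_eq_head?,
    head?_filter_getElem _ (fun x => anyNonzero (column grid x)) (fun x => !anyNonzero (column grid x)) (fun a => rfl),
    List.getElem?_eq_getElem hlt, PySem.List.getElem_pyRange_one]
  simp

theorem X_last (grid : List (List Int)) (W x₀ : Int)
    (hx : x₀ ∈ PySem.List.pyRange 0 W 1) (hc : anyNonzero (column grid x₀) = true) :
    (((PySem.List.pyRange 0 W 1).filter fun x => anyNonzero (column grid x)).getLastD 0) + 1
      = W - (((PySem.List.pyRange 0 W 1).reverse.takeWhile fun x => !anyNonzero (column grid x)).length : Int) := by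
  have hxr : x₀ ∈ (PySem.List.pyRange 0 W 1).reverse := List.mem_reverse.mpr hx
  have hlt : ((PySem.List.pyRange 0 W 1).reverse.takeWhile fun x => !anyNonzero (column grid x)).length
      < (PySem.List.pyRange 0 W 1).length := by
    have := length_takeWhile_lt (fun x => !anyNonzero (column grid x)) hxr (by simp [hc])
    simpa using this
  have hLlen : (PySem.List.pyRange 0 W 1).length = W.toNat := by
    rw [PySem.List.length_pyRange_one]; norm_num
  rw [List.getLastD_eq_getLast?, List.getLast?_eq_head?_reverse, ← List.filter_reverse,
    head?_filter_getElem _ (fun x => anyNonzero (column grid x)) (fun x => !anyNonzero (column grid x)) (fun a => rfl),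
    List.getElem?_reverse hlt,
    List.getElem?_eq_getElem (show (PySem.List.pyRange 0 W 1).length - 1 -
        ((PySem.List.pyRange 0 W 1).reverse.takeWhile fun x => !anyNonzero (column grid x)).length
        < (PySem.List.pyRange 0 W 1).length from by omega),
    PySem.List.getElem_pyRange_one]
  simp only [Option.getD_some]
  omega

-- ===== VERDICT (by name: the statement is the Claim_ definition above) =====
theorem deleteBlank_spec : Claim_equal_deleteBlank := by
  intro grid _ hpre
  unfold Pre_deleteBlank at hpre
  obtain ⟨hgne, hlen, hwit⟩ := hpre
  unfold Spec_deleteBlank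
  by_cases hex : ∃ r ∈ grid, anyNonzero r = true
  · obtain ⟨r₀, hm, h⟩ := hex
    obtain ⟨r₁, hm₁, j, hjW, hjnz⟩ : ∃ r ∈ grid, ∃ j < (grid.headD []).length, r.getD j 0 ≠ 0 := by
      refine hwit ⟨r₀, hm, ?_⟩
      rcases List.any_eq_true.mp h with ⟨v, hv1, hv2⟩
      exact ⟨v, hv1, by simpa using hv2⟩
    have hxmem : (j : Int) ∈ PySem.List.pyRange 0 (((grid.headD []).length : Nat) : Int) 1 :=
      PySem.List.mem_pyRange_one.mpr ⟨Int.natCast_nonneg j, by exact_mod_cast hjW⟩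
    have hval : PySem.List.pyGetD r₁ (j : Int) 0 = r₁.getD j 0 := PySem.List.pyGetD_natCast r₁ j 0
    have hcol : anyNonzero (column grid (j : Int)) = true := by
      unfold anyNonzero column
      refine List.any_eq_true.mpr ⟨r₁.getD j 0, List.mem_map.mpr ⟨r₁, hm₁, hval⟩, by simpa using hjnz⟩
    simp only [deleteBlank, deleteBlank_alt]
    rw [if_neg (B_rows_ne grid r₀ hm h)]
    simp only [rowScan_bot, colScan_bot]
    simp only [rowScan_top, colScan_eq,
      B_rows_head grid r₀ hm h, B_rows_last grid r₀ hm h,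
      X_head grid _ _ hxmem hcol, X_last grid _ _ hxmem hcol]
  · have hall : ∀ r ∈ grid, anyNonzero r = false := by
      intro r hr
      by_contra hc
      exact hex ⟨r, hr, by simpa using hc⟩
    have hfil : (PySem.List.enumerate grid 0).filter (fun p => anyNonzero p.2) = [] := by
      apply List.filter_eq_nil_iff.mpr
      intro p hp
      rcases (PySem.List.mem_enumerate_iff grid 0 p).mp hp with ⟨i, hi, rfl⟩
      simp [hall _ (List.getElem_mem hi)]
    have hB : deleteBlank_alt grid = [] := by
      simp [deleteBlank_alt, hfil]
    rw [hB]
    have h1 : (grid.takeWhile fun r => !anyNonzero r) = grid :=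
      takeWhile_all _ (fun r hr => by simp [hall r hr])
    have h2 : (grid.reverse.takeWhile fun r => !anyNonzero r) = grid.reverse :=
      takeWhile_all _ (fun r hr => by simp [hall r (List.mem_reverse.mp hr)])
    simp only [deleteBlank, rowScan_top, rowScan_bot, h1, h2, List.length_reverse]
    rw [sub_self]
    rw [PySem.List.slice_toNat grid (Int.natCast_nonneg _) le_rfl]
    simp
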